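-- pv_equiv track=rewrite | github.com/araujocrk/Modulo03-Desenvolvimento-Orientado-a-Testes | lista02/q1/q1.py | listaImpares
-- ===== SOURCE A (Python) =====
-- def listaImpares(lista):
--     if not all(isinstance(i, int) for i in lista):
--         return Exception
--     impares = []
--     for i in lista:
--         if i % 2 != 0:
--             impares.append(i)
--     return impares
-- ===== SOURCE B (Python) =====
-- def listaImpares(lista):
--     # Fused single pass: validate each element as it is visited (returning
--     # the Exception class immediately on the first non-int, before any
--     # further work) and collect odd ints in the same loop.
--     impares = []
--     for i in lista:
--         if not isinstance(i, int):
--             return Exception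
--         if i % 2 != 0:
--             impares.append(i)
--     return impares
-- ===== Notes on version B (the rewrite author's own statement) =====
-- stated objective: simpler
-- what changed: Fused A's separate all(isinstance) validation pass and its filter loop into one single pass that validates each element and collects odds in the same iteration (ported as structural recursion vs A's fold).
import Mathlib
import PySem

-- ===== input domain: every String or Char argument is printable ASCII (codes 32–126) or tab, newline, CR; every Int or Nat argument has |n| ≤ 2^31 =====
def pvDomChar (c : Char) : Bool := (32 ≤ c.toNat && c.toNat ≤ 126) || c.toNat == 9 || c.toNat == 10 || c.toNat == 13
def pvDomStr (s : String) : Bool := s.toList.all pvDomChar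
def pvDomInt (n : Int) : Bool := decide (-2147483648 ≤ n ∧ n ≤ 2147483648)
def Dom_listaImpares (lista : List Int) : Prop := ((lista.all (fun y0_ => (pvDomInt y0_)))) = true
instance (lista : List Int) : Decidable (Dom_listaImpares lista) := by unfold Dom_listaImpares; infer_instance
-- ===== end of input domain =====

-- B fuses A's separate isinstance-validation pass and filter loop into one pass; on List Int inputs the validation never fires, so both return the odd elements in order.


-- ===== PORT A =====
-- A's all(isinstance(i, int)) is always true for a List Int argument, so the
-- Exception branch is unreachable; the loop appends odd elements to impares.
def listaImpares (lista : List Int) : List Int :=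
  if lista.all (fun _ => true) then
    lista.foldl (fun impares i => if PySem.Int.mod i 2 ≠ 0 then impares ++ [i] else impares) []
  else []

-- ===== PORT B =====
-- B's fused loop: on List Int the isinstance guard never fires; the loop is
-- ported as structural recursion producing the odd elements front-to-back.
def listaImpares_alt (lista : List Int) : List Int :=
  match lista with
  | [] => []
  | i :: rest =>
    if PySem.Int.mod i 2 ≠ 0 then i :: listaImpares_alt rest else listaImpares_alt rest

-- ===== PRECONDITION & SPEC =====
def Spec_listaImpares (lista : List Int) (out : List Int) : Prop := out = listaImpares_alt lista
instance (lista : List Int) (out : List Int) : Decidable (Spec_listaImpares lista out) := by unfold Spec_listaImpares; infer_instance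

-- ===== CLAIM (what is proved, stated in full; the proofs are below) =====
def Claim_equal_listaImpares : Prop := ∀ (lista : List Int), Dom_listaImpares lista → Spec_listaImpares lista (listaImpares lista)

-- ===== LEMMAS AND PROOFS =====
theorem listaImpares_foldl_acc (lista : List Int) (acc : List Int) :
    lista.foldl (fun impares i => if PySem.Int.mod i 2 ≠ 0 then impares ++ [i] else impares) acc
      = acc ++ listaImpares_alt lista := by
  induction lista generalizing acc with
  | nil => simp [listaImpares_alt]
  | cons i rest ih =>
    simp only [List.foldl, listaImpares_alt]
    split <;> rw [ih] <;> simp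

-- ===== VERDICT (by name: the statement is the Claim_ definition above) =====
theorem listaImpares_spec : Claim_equal_listaImpares := by
  intro lista _
  unfold Spec_listaImpares listaImpares
  rw [listaImpares_foldl_acc]
  simp
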